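-- pv_equiv track=rewrite | github.com/Sagarika-Dubey/DSA | min_del.py | minDeletion
-- ===== SOURCE A (Python) =====
-- from collections import Counter
--
-- def minDeletion(s: str, k: int) -> int:
--     freq=Counter(s)
--     d_s= set(s)
--
--     if len(d_s)==k:
--         return 0
--
--     fre_count= sorted(freq.values())
--     dele=0
--     distinct=len(fre_count)
--
--     for i in fre_count:
--         if distinct<=k:
--             break
--         dele+= i
--         distinct-=1
--
--     return dele
-- ===== SOURCE B (Python) =====
-- def minDeletion(s: str, k: int) -> int:
--     freq = {}
--     for ch in s:
--         freq[ch] = freq.get(ch, 0) + 1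
--     distinct = len(freq)
--     if distinct <= k:
--         return 0
--     bucket = {}
--     for c in freq.values():
--         bucket[c] = bucket.get(c, 0) + 1
--     dele = 0
--     need = distinct - k
--     for c in range(1, max(bucket, default=0) + 1):
--         if need <= 0:
--             break
--         take = min(bucket.get(c, 0), need)
--         dele += c * take
--         need -= take
--     return dele
-- ===== Notes on version B (the rewrite author's own statement) =====
-- stated objective: alternative
-- what changed: Replaced A's sort of the frequency values and element-by-element deletion loop by a bucket table keyed by frequency (how many distinct characters occur c times), consumed in increasing count order with an arithmetic take per bucket.
import Mathlib
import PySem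

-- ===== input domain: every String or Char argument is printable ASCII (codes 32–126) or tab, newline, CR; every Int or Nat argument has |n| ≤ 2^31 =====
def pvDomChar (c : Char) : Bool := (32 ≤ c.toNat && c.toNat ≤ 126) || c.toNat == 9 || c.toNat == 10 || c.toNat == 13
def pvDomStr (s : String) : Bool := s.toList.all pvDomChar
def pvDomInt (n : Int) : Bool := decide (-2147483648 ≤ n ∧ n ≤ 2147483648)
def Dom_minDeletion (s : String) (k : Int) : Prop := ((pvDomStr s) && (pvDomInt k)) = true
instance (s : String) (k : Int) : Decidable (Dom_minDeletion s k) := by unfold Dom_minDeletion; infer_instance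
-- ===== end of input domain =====

-- B replaces A's sort of the frequency values by a bucket table indexed by frequency,
-- consumed in increasing count order (objective: alternative algorithm, same exact result).

-- ===== PORT A =====
-- the for-loop over the sorted frequency values, with its break
def minDeletionLoopA (k : Int) : List Int → Int → Int → Int
  | [], dele, _ => dele
  | i :: rest, dele, distinct =>
      if distinct ≤ k then dele
      else minDeletionLoopA k rest (dele + i) (distinct - 1)

def minDeletion (s : String) (k : Int) : Int :=
  let freq := PySem.Dict.counter s.toList
  let d_s := PySem.Set.ofList s.toList
  if (d_s.length : Int) = k then 0
  else
    let fre_count := PySem.List.sorted freq.values (fun x => x) false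
    minDeletionLoopA k fre_count 0 (fre_count.length : Int)

-- ===== PORT B =====
-- the for-loop over count values c = 1 .. max(bucket, default=0), with its break
def minDeletionLoopB (bucket : PySem.Dict Int Int) : List Int → Int → Int → Int
  | [], dele, _ => dele
  | c :: rest, dele, need =>
      if need ≤ 0 then dele
      else
        let take := min (bucket.getD c 0) need
        minDeletionLoopB bucket rest (dele + c * take) (need - take)

def minDeletion_alt (s : String) (k : Int) : Int :=
  let freq := s.toList.foldl (fun d ch => d.insert ch (d.getD ch 0 + 1)) PySem.Dict.empty
  let distinct : Int := freq.size
  if distinct ≤ k then 0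
  else
    let bucket := freq.values.foldl (fun d c => d.insert c (d.getD c 0 + 1)) PySem.Dict.empty
    let maxc := PySem.List.maxD bucket.keys (fun x => x) 0
    minDeletionLoopB bucket (PySem.List.pyRange 1 (maxc + 1) 1) 0 (distinct - k)

-- ===== PRECONDITION & SPEC =====
def Spec_minDeletion (s : String) (k : Int) (out : Int) : Prop := out = minDeletion_alt s k
instance (s : String) (k : Int) (out : Int) : Decidable (Spec_minDeletion s k out) := by unfold Spec_minDeletion; infer_instance

-- ===== CLAIM (what is proved, stated in full; the proofs are below) =====
def Claim_equal_minDeletion : Prop := ∀ (s : String) (k : Int), Dom_minDeletion s k → Spec_minDeletion s k (minDeletion s k)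

-- ===== LEMMAS AND PROOFS =====

-- the frequency-value list of Counter(s): one count per distinct character
def pvVals (xs : List Char) : List Int :=
  (PySem.Set.ofList xs).map (fun c => (xs.count c : Int))

lemma pvVals_eq (xs : List Char) : (PySem.Dict.counter xs).values = pvVals xs := by
  show ((PySem.Dict.counter xs).items.map Prod.snd) = _
  rw [PySem.Dict.items_counter]
  simp [pvVals]

lemma counter_size (xs : List Char) :
    (PySem.Dict.counter xs).size = (PySem.Set.ofList xs).length := by
  show ((PySem.Dict.counter xs).items.length) = _
  rw [PySem.Dict.items_counter]
  simp

-- the multiset of counts, grouped by value: for each c in cs, (count of c in vals) copies of c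
def pvFlat (vals : List Int) (cs : List Int) : List Int :=
  cs.flatMap (fun c => List.replicate (vals.count c) c)

-- A's loop takes the first  length - min k⁺ length  elements
lemma loopA_eq_take (k : Int) (L : List Int) (dele : Int) :
    minDeletionLoopA k L dele (L.length : Int)
      = dele + ((L.take (L.length - min k.toNat L.length)).sum) := by
  induction L generalizing dele with
  | nil => simp [minDeletionLoopA]
  | cons x xs ih =>
      by_cases h : ((xs.length : Int) + 1) ≤ k
      · have hm : min k.toNat (xs.length + 1) = xs.length + 1 := by omega
        simp [minDeletionLoopA, h, hm]
      · have hk : k.toNat ≤ xs.length := by omega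
        have hm : xs.length + 1 - min k.toNat (xs.length + 1) = (xs.length - k.toNat) + 1 := by
          omega
        have hm2 : min k.toNat xs.length = k.toNat := by omega
        simp only [minDeletionLoopA, List.length_cons, hm]
        have hcond : ¬ (((xs.length + 1 : Nat) : Int) ≤ k) := by push_cast; omega
        rw [if_neg hcond]
        have h1 : ((xs.length + 1 : Nat) : Int) - 1 = (xs.length : Int) := by push_cast; ring
        rw [h1, ih (dele + x), hm2, List.take_succ_cons, List.sum_cons]
        omega

-- B's loop takes the first need⁺ elements of the grouped list
lemma loopB_eq_take (vals : List Int) (cs : List Int) (dele need : Int) :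
    minDeletionLoopB (PySem.Dict.counter vals) cs dele need
      = dele + ((pvFlat vals cs).take need.toNat).sum := by
  induction cs generalizing dele need with
  | nil => simp [minDeletionLoopB, pvFlat]
  | cons c cs ih =>
      by_cases h : need ≤ 0
      · have h0 : need.toNat = 0 := by omega
        simp [minDeletionLoopB, h, h0]
      · have hget : (PySem.Dict.counter vals).getD c 0 = (vals.count c : Int) :=
          PySem.Dict.getD_counter vals c
        simp only [minDeletionLoopB, hget, if_neg h]
        rw [ih]
        have hflat : pvFlat vals (c :: cs)
            = List.replicate (vals.count c) c ++ pvFlat vals cs := by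
          simp [pvFlat]
        rw [hflat, List.take_append, List.take_replicate, List.sum_append,
          List.sum_replicate, List.length_replicate]
        have ht : ((min need.toNat (vals.count c) : Nat) : Int)
            = min ((vals.count c : Nat) : Int) need := by omega
        have h2 : (need - min ((vals.count c : Nat) : Int) need).toNat
            = need.toNat - vals.count c := by omega
        rw [h2]
        have : ((min need.toNat (vals.count c)) • c : Int)
            = c * min ((vals.count c : Nat) : Int) need := by
          rw [nsmul_eq_mul, ht, mul_comm]
        rw [this]
        ring

-- counting the grouped list
lemma count_pvFlat (vals : List Int) (cs : List Int) (hnd : cs.Nodup) (a : Int) :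
    (pvFlat vals cs).count a = if a ∈ cs then vals.count a else 0 := by
  induction cs with
  | nil => simp [pvFlat]
  | cons c cs ih =>
      have hnd' : cs.Nodup := hnd.of_cons
      have hnc : c ∉ cs := by
        intro hmem; exact (List.nodup_cons.mp hnd).1 hmem
      have hflat : pvFlat vals (c :: cs)
          = List.replicate (vals.count c) c ++ pvFlat vals cs := by simp [pvFlat]
      rw [hflat, List.count_append, List.count_replicate, ih hnd']
      by_cases hac : a = c
      · subst hac
        simp [hnc]
      · simp [hac, Ne.symm hac, List.mem_cons]

-- the grouped list is weakly increasing when the groups are strictly increasing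
lemma pairwise_pvFlat (vals : List Int) (cs : List Int)
    (h : cs.Pairwise (· < ·)) : (pvFlat vals cs).Pairwise (· ≤ ·) := by
  induction cs with
  | nil => simp [pvFlat]
  | cons c cs ih =>
      have hflat : pvFlat vals (c :: cs)
          = List.replicate (vals.count c) c ++ pvFlat vals cs := by simp [pvFlat]
      rw [hflat, List.pairwise_append]
      refine ⟨?_, ih (List.Pairwise.of_cons h), ?_⟩
      · exact List.pairwise_replicate.mpr (Or.inr le_rfl)
      · intro a ha b hb
        have ha' : a = c := List.eq_of_mem_replicate ha
        obtain ⟨c', hc', hb'⟩ := List.mem_flatMap.mp hb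
        have hb'' : b = c' := List.eq_of_mem_replicate hb'
        have : c < c' := (List.pairwise_cons.mp h).1 c' hc'
        omega

lemma pyRange_pairwise_lt (a b : Int) :
    (PySem.List.pyRange a b 1).Pairwise (· < ·) := by
  rw [PySem.List.pyRange_one]
  exact List.Pairwise.map _ (fun x y hxy => by omega) List.pairwise_lt_range

lemma pyRange_nodup (a b : Int) : (PySem.List.pyRange a b 1).Nodup :=
  (pyRange_pairwise_lt a b).imp (by intro x y h; omega)

-- sorted(vals) is exactly the bucket-grouped list, for counts from 1 to a bound M
lemma sorted_eq_pvFlat (vals : List Int) (M : Int)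
    (hpos : ∀ v ∈ vals, 1 ≤ v) (hle : ∀ v ∈ vals, v ≤ M) :
    PySem.List.sorted vals (fun x => x) false
      = pvFlat vals (PySem.List.pyRange 1 (M + 1) 1) := by
  apply PySem.List.sorted_id_eq_of_perm_of_pairwise
  · apply List.perm_iff_count.mpr
    intro a
    rw [count_pvFlat _ _ (pyRange_nodup _ _) a]
    by_cases hmem : a ∈ PySem.List.pyRange 1 (M + 1) 1
    · simp [hmem]
    · have hrange := PySem.List.mem_pyRange_one (x := a) (a := 1) (b := M + 1)
      have hout : ¬ (1 ≤ a ∧ a < M + 1) := fun hc => hmem (hrange.mpr hc)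
      have hnot : a ∉ vals := by
        intro hv
        exact hout ⟨hpos a hv, by have := hle a hv; omega⟩
      simp [hmem, List.count_eq_zero.mpr hnot]
  · exact pairwise_pvFlat _ _ (pyRange_pairwise_lt _ _)

-- every frequency value is positive
lemma pvVals_pos (xs : List Char) : ∀ v ∈ pvVals xs, 1 ≤ v := by
  intro v hv
  obtain ⟨c, hc, rfl⟩ := List.mem_map.mp hv
  have hcx : c ∈ xs := (PySem.Set.mem_ofList xs c).mp hc
  have := List.count_pos_iff.mpr hcx
  omega

-- ===== VERDICT (by name: the statement is the Claim_ definition above) =====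
theorem minDeletion_spec : Claim_equal_minDeletion := by
  intro s k _
  show minDeletion s k = minDeletion_alt s k
  simp only [minDeletion, minDeletion_alt,
    PySem.Dict.foldl_insert_getD_add_one_eq_counter, pvVals_eq, counter_size]
  set xs := s.toList with hxs
  set V := pvVals xs with hV
  set Dn := (PySem.Set.ofList xs).length with hDn
  have hlenV : V.length = Dn := by simp [hV, pvVals, hDn]
  set M := PySem.List.maxD (PySem.Dict.counter V).keys (fun x => x) 0 with hM
  have hle : ∀ v ∈ V, v ≤ M := by
    intro v hv
    apply PySem.List.le_maxD_id
    rw [PySem.Dict.keys_counter]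
    exact (PySem.Set.mem_ofList V v).mpr hv
  have hpos : ∀ v ∈ V, 1 ≤ v := pvVals_pos xs
  have hsorted := sorted_eq_pvFlat V M hpos hle
  have hlenS : (PySem.List.sorted V (fun x => x) false).length = Dn := by
    rw [(PySem.List.sorted_perm V (fun x => x) false).length_eq, hlenV]
  by_cases hEq : (Dn : Int) = k
  · rw [if_pos hEq, if_pos (le_of_eq hEq)]
  · rw [if_neg hEq]
    by_cases hLe : (Dn : Int) ≤ k
    · -- Dn < k: A's loop breaks at once, B returns 0 from the early test
      rw [if_pos hLe, loopA_eq_take]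
      have hmin : (PySem.List.sorted V (fun x => x) false).length
          - min k.toNat (PySem.List.sorted V (fun x => x) false).length = 0 := by
        rw [hlenS]; omega
      rw [hmin]
      simp
    · -- Dn > k: both take the m smallest frequency values
      rw [if_neg hLe, loopA_eq_take, loopB_eq_take, hsorted]
      set F := pvFlat V (PySem.List.pyRange 1 (M + 1) 1) with hF
      have hlenF : F.length = Dn := by rw [← hsorted]; exact hlenS
      have hgoal : F.take (F.length - min k.toNat F.length)
          = F.take ((Dn : Int) - k).toNat := by
        by_cases hk : 0 ≤ k
        · have : F.length - min k.toNat F.length = ((Dn : Int) - k).toNat := by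
            rw [hlenF]; omega
          rw [this]
        · have h1 : F.length - min k.toNat F.length = F.length := by omega
          have h3 : F.length ≤ ((Dn : Int) - k).toNat := by rw [hlenF]; omega
          rw [h1, List.take_length, List.take_of_length_le h3]
      rw [hgoal]
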